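-- pv_equiv track=rewrite | github.com/cheng315ncu/EEG | generate_graph.py | get_valid_informations
-- ===== SOURCE A (Python) =====
-- def get_valid_informations(notes):
--     labels, indices = [], []
--     nesting = 0
--     for idx, note in enumerate(notes):
--         if isinstance(note, str):
--             if note.startswith('('): nesting += 1; continue
--             if note.endswith(')'): nesting = max(nesting-1, 0); continue
--             if nesting == 0:
--                 labels.append(note); indices.append(idx)
--     return labels, indices
-- ===== SOURCE B (Python) =====
-- def get_valid_informations(notes):
--     # Pass 1: compute the nesting level in effect *before* each note.
--     levels = []
--     nesting = 0
--     for note in notes: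
--         levels.append(nesting)
--         if note.startswith('('):
--             nesting += 1
--         elif note.endswith(')'):
--             nesting = max(nesting - 1, 0)
--     # Pass 2: keep notes that are neither openers nor closers at level 0.
--     labels, indices = [], []
--     for idx, (note, lvl) in enumerate(zip(notes, levels)):
--         if not note.startswith('(') and not note.endswith(')') and lvl == 0:
--             labels.append(note)
--             indices.append(idx)
--     return labels, indices
-- ===== Notes on version B (the rewrite author's own statement) =====
-- stated objective: alternative
-- what changed: Single stateful filter loop replaced by two passes: first compute the pre-note nesting level for every position, then filter by a pure predicate over (note, level).
import Mathlib
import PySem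

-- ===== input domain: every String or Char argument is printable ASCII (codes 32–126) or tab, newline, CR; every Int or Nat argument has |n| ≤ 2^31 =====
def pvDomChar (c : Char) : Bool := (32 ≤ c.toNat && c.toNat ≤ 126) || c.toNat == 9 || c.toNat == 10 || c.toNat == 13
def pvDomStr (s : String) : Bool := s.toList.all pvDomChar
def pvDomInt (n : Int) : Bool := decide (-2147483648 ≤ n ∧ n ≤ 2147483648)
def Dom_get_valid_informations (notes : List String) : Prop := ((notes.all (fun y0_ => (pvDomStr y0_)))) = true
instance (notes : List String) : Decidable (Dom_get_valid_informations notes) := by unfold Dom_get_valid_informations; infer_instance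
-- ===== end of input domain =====

-- B replaces A's single stateful filter loop by two passes: compute the pre-note
-- nesting level per position, then filter with a pure predicate; same output.


-- ===== PORT A =====
-- state = (labels, indices, nesting); one pass over enumerate(notes)
def gviStepA (st : List String × List Int × Int) (p : Int × String) : List String × List Int × Int :=
  if PySem.Str.startswith p.2 "(" then (st.1, st.2.1, st.2.2 + 1)
  else if PySem.Str.endswith p.2 ")" then (st.1, st.2.1, max (st.2.2 - 1) 0)
  else if st.2.2 = 0 then (st.1 ++ [p.2], st.2.1 ++ [p.1], st.2.2)
  else st

def get_valid_informations (notes : List String) : List String × List Int :=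
  let st := (PySem.List.enumerate notes).foldl gviStepA ([], [], 0)
  (st.1, st.2.1)

-- ===== PORT B =====
-- pass 1: nesting level in effect before each note
def gviLevels : List String → Int → List Int
  | [], _ => []
  | note :: rest, n =>
    n :: gviLevels rest (if PySem.Str.startswith note "(" then n + 1
      else if PySem.Str.endswith note ")" then max (n - 1) 0 else n)

-- pass 2 step: pure filter over (idx, (note, lvl))
def gviStepB (st : List String × List Int) (p : Int × (String × Int)) : List String × List Int :=
  if !(PySem.Str.startswith p.2.1 "(") && !(PySem.Str.endswith p.2.1 ")") && (p.2.2 == 0)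
  then (st.1 ++ [p.2.1], st.2 ++ [p.1]) else st

def get_valid_informations_alt (notes : List String) : List String × List Int :=
  (PySem.List.enumerate (notes.zip (gviLevels notes 0))).foldl gviStepB ([], [])

-- ===== PRECONDITION & SPEC =====
def Spec_get_valid_informations (notes : List String) (out : List String × List Int) : Prop := out = get_valid_informations_alt notes
instance (notes : List String) (out : List String × List Int) : Decidable (Spec_get_valid_informations notes out) := by unfold Spec_get_valid_informations; infer_instance

-- ===== CLAIM (what is proved, stated in full; the proofs are below) =====
def Claim_equal_get_valid_informations : Prop := ∀ (notes : List String), Dom_get_valid_informations notes → Spec_get_valid_informations notes (get_valid_informations notes)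

-- ===== LEMMAS AND PROOFS =====
-- A's final nesting value after processing `notes` starting from `n`
def gviFinalN : List String → Int → Int
  | [], n => n
  | note :: rest, n =>
    gviFinalN rest (if PySem.Str.startswith note "(" then n + 1
      else if PySem.Str.endswith note ")" then max (n - 1) 0 else n)

lemma gvi_main (notes : List String) : ∀ (n : Int) (labels : List String) (indices : List Int) (s : Int),
    (PySem.List.enumerate notes s).foldl gviStepA (labels, indices, n) =
      (((PySem.List.enumerate (notes.zip (gviLevels notes n)) s).foldl gviStepB (labels, indices)).1,
       ((PySem.List.enumerate (notes.zip (gviLevels notes n)) s).foldl gviStepB (labels, indices)).2,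
       gviFinalN notes n) := by
  induction notes with
  | nil => intro n labels indices s; simp [PySem.List.enumerate_nil, gviFinalN]
  | cons note rest ih =>
    intro n labels indices s
    simp only [gviLevels, List.zip_cons_cons, PySem.List.enumerate_cons, List.foldl_cons,
      gviFinalN, gviStepA, gviStepB, PySem.Str.startswith_eq, PySem.Str.endswith_eq]
    by_cases h1 : PySem.Chars.startswith note.toList ['('] = true
    · simp [h1, ih]
    · by_cases h2 : PySem.Chars.endswith note.toList [')'] = true
      · simp [h1, h2, ih]
      · by_cases h3 : n = 0
        · simp [h1, h2, h3, ih]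
        · simp [h1, h2, h3, ih]

-- ===== VERDICT (by name: the statement is the Claim_ definition above) =====
theorem get_valid_informations_spec : Claim_equal_get_valid_informations := by
  intro notes _
  unfold Spec_get_valid_informations get_valid_informations get_valid_informations_alt
  rw [gvi_main notes 0 [] [] 0]
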